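-- pv_equiv track=rewrite | github.com/kim-sangah/algorithm | 프로그래머스/0/120956. 옹알이 （1）/옹알이 （1）.py | solution
-- ===== SOURCE A (Python) =====
-- def solution(babbling):
--     a = ["aya", "ye", "woo", "ma"]
--     count = 0
--     for word in babbling:
--         for sound in a:
--             word = word.replace(sound, " ")
--         if word.strip() == '':
--             count += 1
--     return count
-- ===== SOURCE B (Python) =====
-- def solution(babbling):
--     sounds = ("aya", "ye", "woo", "ma")
--
--     def ok(w):
--         i = 0
--         while i < len(w):
--             if w[i].isspace():
--                 i += 1
--                 continue
--             for s in sounds: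
--                 if w.startswith(s, i):
--                     i += len(s)
--                     break
--             else:
--                 return False
--         return True
--
--     return sum(1 for w in babbling if ok(w))
-- ===== Notes on version B (the rewrite author's own statement) =====
-- stated objective: alternative
-- what changed: Replaced the replace-each-sound-with-space-then-strip pipeline by a single left-to-right scan that consumes one allowed sound or one whitespace character at each position (the four sounds have distinct first letters, so the parse is deterministic and matches A's global replaces).
import Mathlib
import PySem

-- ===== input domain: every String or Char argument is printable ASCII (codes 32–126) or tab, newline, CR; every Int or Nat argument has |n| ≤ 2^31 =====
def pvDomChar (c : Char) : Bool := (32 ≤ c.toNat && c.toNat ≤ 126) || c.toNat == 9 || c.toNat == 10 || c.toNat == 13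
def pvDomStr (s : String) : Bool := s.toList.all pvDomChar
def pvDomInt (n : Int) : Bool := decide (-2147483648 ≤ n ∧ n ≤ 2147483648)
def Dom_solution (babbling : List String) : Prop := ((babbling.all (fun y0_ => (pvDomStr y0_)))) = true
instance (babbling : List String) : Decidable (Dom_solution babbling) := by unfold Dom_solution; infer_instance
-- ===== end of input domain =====

-- B replaces A's "replace each allowed sound by a space, then strip" pipeline by a single
-- left-to-right scan that consumes one allowed sound or one whitespace character at a time
-- (alternative decomposition, same cost).

-- ===== PORT A =====
-- A: for each word, replace each of the four sounds by " " in turn; count words whose strip is "".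
def solution (babbling : List String) : Int :=
  let a : List String := ["aya", "ye", "woo", "ma"]
  babbling.foldl
    (fun count word =>
      let word := a.foldl (fun w sound => PySem.Str.replace w sound " ") word
      if PySem.Str.strip word = "" then count + 1 else count)
    0

-- ===== PORT B =====
-- B's scanner `ok`: at each position consume one whitespace character or one of the four sounds.
def okAux : List Char → Bool
  | [] => true
  | c :: t =>
    if PySem.Chars.isspace c then okAux t
    else if ['a','y','a'].isPrefixOf (c :: t) then okAux (t.drop 2)
    else if ['y','e'].isPrefixOf (c :: t) then okAux (t.drop 1)
    else if ['w','o','o'].isPrefixOf (c :: t) then okAux (t.drop 2)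
    else if ['m','a'].isPrefixOf (c :: t) then okAux (t.drop 1)
    else false
termination_by l => l.length
decreasing_by all_goals simp [List.length_drop]


def solution_alt (babbling : List String) : Int :=
  babbling.foldl (fun acc w => acc + if okAux w.toList then 1 else 0) 0

-- ===== PRECONDITION & SPEC =====
def Spec_solution (babbling : List String) (out : Int) : Prop := out = solution_alt babbling
instance (babbling : List String) (out : Int) : Decidable (Spec_solution babbling out) := by unfold Spec_solution; infer_instance

-- ===== CLAIM (what is proved, stated in full; the proofs are below) =====
def Claim_equal_solution : Prop := ∀ (babbling : List String), Dom_solution babbling → Spec_solution babbling (solution babbling)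

-- ===== LEMMAS AND PROOFS =====

theorem replace_go_acc (old new : List Char) (fuel : Nat) : ∀ (l acc : List Char),
    PySem.Chars.replace.go old new fuel l acc
      = acc.reverse ++ PySem.Chars.replace.go old new fuel l [] := by
  induction fuel with
  | zero => intro l acc; simp [PySem.Chars.replace.go]
  | succ n ih =>
    intro l acc
    cases l with
    | nil => simp [PySem.Chars.replace.go]
    | cons c t =>
      rw [PySem.Chars.replace.go, PySem.Chars.replace.go]
      split
      · rw [ih, ih (List.drop old.length (c :: t)) (new.reverse ++ [])]
        simp
      · rw [ih, ih t [c]]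
        simp

theorem replace_go_fuel (old new : List Char) (hold : old ≠ []) : ∀ (fuel : Nat) (l acc : List Char),
    l.length ≤ fuel →
    PySem.Chars.replace.go old new fuel l acc
      = PySem.Chars.replace.go old new l.length l acc := by
  intro fuel
  induction fuel using Nat.strong_induction_on with
  | _ fuel ih =>
    intro l acc h
    match fuel, l with
    | 0, l =>
      have : l = [] := by cases l <;> simp_all
      subst this; rfl
    | n+1, [] => simp [PySem.Chars.replace.go]
    | n+1, c :: t =>
      rw [PySem.Chars.replace.go]
      rw [show (c :: t).length = t.length + 1 from rfl, PySem.Chars.replace.go]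
      have hol : 1 ≤ old.length := by cases old <;> simp_all
      have hn : t.length ≤ n := by simp at h; omega
      split
      · have h2 : (List.drop old.length (c :: t)).length ≤ t.length := by
          simp [List.length_drop]; omega
        rw [ih n (by omega) _ _ (le_trans h2 hn)]
        rw [ih t.length (by omega) _ _ h2]
      · rw [ih n (by omega) t _ hn]

theorem replace_nil (old new : List Char) (hold : old ≠ []) :
    PySem.Chars.replace [] old new = [] := by
  rw [PySem.Chars.replace]
  have : old.isEmpty = false := by cases old <;> simp_all
  simp [this, PySem.Chars.replace.go]

theorem replace_cons_neg (old new : List Char) (c : Char) (t : List Char)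
    (hold : old ≠ []) (h : old.isPrefixOf (c :: t) = false) :
    PySem.Chars.replace (c :: t) old new = c :: PySem.Chars.replace t old new := by
  have he : old.isEmpty = false := by cases old <;> simp_all
  rw [PySem.Chars.replace, PySem.Chars.replace]
  simp only [he, Bool.false_eq_true, if_false]
  rw [show (c :: t).length = t.length + 1 from rfl, PySem.Chars.replace.go]
  simp only [h, Bool.false_eq_true, if_false]
  rw [replace_go_acc]
  simp

theorem replace_pos (old new s : List Char) (hold : old ≠ []) (h : old.isPrefixOf s = true) :
    PySem.Chars.replace s old new
      = new ++ PySem.Chars.replace (s.drop old.length) old new := by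
  have he : old.isEmpty = false := by cases old <;> simp_all
  have hol : 1 ≤ old.length := by cases old <;> simp_all
  cases s with
  | nil =>
    have : old = [] := by have := List.isPrefixOf_iff_prefix.mp h; simpa using List.prefix_nil.mp this
    exact absurd this hold
  | cons c t =>
    rw [PySem.Chars.replace, PySem.Chars.replace]
    simp only [he, Bool.false_eq_true, if_false]
    rw [show (c :: t).length = t.length + 1 from rfl, PySem.Chars.replace.go]
    simp only [h, if_true]
    rw [replace_go_acc]
    have h2 : (List.drop old.length (c :: t)).length ≤ t.length := by
      simp [List.length_drop]; omega
    rw [replace_go_fuel old new hold t.length _ _ h2]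
    simp

theorem replace_cons_inv (old : List Char) (hold : old ≠ []) (s z : List Char) (c : Char)
    (h : PySem.Chars.replace s old [' '] = c :: z) (hc : c ≠ ' ') :
    ∃ t, s = c :: t ∧ z = PySem.Chars.replace t old [' '] := by
  cases s with
  | nil => rw [replace_nil old _ hold] at h; exact absurd h (by simp)
  | cons c' t =>
    by_cases hp : old.isPrefixOf (c' :: t) = true
    · rw [replace_pos old _ _ hold hp] at h
      simp at h
      exact absurd h.1.symm hc
    · rw [replace_cons_neg old _ _ _ hold (by simp [hp])] at h
      injection h with h1 h2
      exact ⟨t, by rw [h1], h2.symm⟩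

def repl4 (cs : List Char) : List Char :=
  PySem.Chars.replace
    (PySem.Chars.replace
      (PySem.Chars.replace
        (PySem.Chars.replace cs ['a','y','a'] [' '])
        ['y','e'] [' '])
      ['w','o','o'] [' '])
    ['m','a'] [' ']

theorem strip_nil_iff (cs : List Char) :
    PySem.Chars.strip cs = [] ↔ cs.all PySem.Chars.isspace = true := by
  unfold PySem.Chars.strip PySem.Chars.rstrip PySem.Chars.lstrip
  rw [List.reverse_eq_nil_iff, List.dropWhile_eq_nil_iff, List.all_eq_true]
  constructor
  · intro h x hx
    rcases (List.takeWhile_append_dropWhile (p := PySem.Chars.isspace) (l := cs)) ▸ List.mem_append.mpr (Or.inl hx) with _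
    by_cases hd : x ∈ List.dropWhile PySem.Chars.isspace cs
    · exact h x (List.mem_reverse.mpr hd)
    · have : x ∈ List.takeWhile PySem.Chars.isspace cs ++ List.dropWhile PySem.Chars.isspace cs := by
        rw [List.takeWhile_append_dropWhile]; exact hx
      rcases List.mem_append.mp this with h1 | h1
      · exact List.mem_takeWhile_imp h1
      · exact absurd h1 hd
  · intro h x hx
    apply h
    have := List.mem_reverse.mp hx
    have : x ∈ List.takeWhile PySem.Chars.isspace cs ++ List.dropWhile PySem.Chars.isspace cs :=
      List.mem_append.mpr (Or.inr this)
    rw [List.takeWhile_append_dropWhile] at this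
    exact this

def Ra (x : List Char) : List Char := PySem.Chars.replace x ['a','y','a'] [' ']
def Ry (x : List Char) : List Char := PySem.Chars.replace x ['y','e'] [' ']
def Rw (x : List Char) : List Char := PySem.Chars.replace x ['w','o','o'] [' ']
def Rm (x : List Char) : List Char := PySem.Chars.replace x ['m','a'] [' ']

theorem repl4_eq (cs : List Char) : repl4 cs = Rm (Rw (Ry (Ra cs))) := rfl

theorem Ra_nil : Ra [] = [] := replace_nil _ _ (by simp)
theorem Ry_nil : Ry [] = [] := replace_nil _ _ (by simp)
theorem Rw_nil : Rw [] = [] := replace_nil _ _ (by simp)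
theorem Rm_nil : Rm [] = [] := replace_nil _ _ (by simp)

theorem Ra_pass (c : Char) (t : List Char) (h : (['a','y','a'] : List Char).isPrefixOf (c :: t) = false) :
    Ra (c :: t) = c :: Ra t := replace_cons_neg _ _ _ _ (by simp) h
theorem Ry_pass (c : Char) (t : List Char) (h : (['y','e'] : List Char).isPrefixOf (c :: t) = false) :
    Ry (c :: t) = c :: Ry t := replace_cons_neg _ _ _ _ (by simp) h
theorem Rw_pass (c : Char) (t : List Char) (h : (['w','o','o'] : List Char).isPrefixOf (c :: t) = false) :
    Rw (c :: t) = c :: Rw t := replace_cons_neg _ _ _ _ (by simp) h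
theorem Rm_pass (c : Char) (t : List Char) (h : (['m','a'] : List Char).isPrefixOf (c :: t) = false) :
    Rm (c :: t) = c :: Rm t := replace_cons_neg _ _ _ _ (by simp) h

theorem Ra_pass' (c : Char) (t : List Char) (h : c ≠ 'a') : Ra (c :: t) = c :: Ra t :=
  Ra_pass c t (by simp [List.isPrefixOf]; intro h'; exact absurd h'.symm h)
theorem Ry_pass' (c : Char) (t : List Char) (h : c ≠ 'y') : Ry (c :: t) = c :: Ry t :=
  Ry_pass c t (by simp [List.isPrefixOf]; intro h'; exact absurd h'.symm h)
theorem Rw_pass' (c : Char) (t : List Char) (h : c ≠ 'w') : Rw (c :: t) = c :: Rw t :=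
  Rw_pass c t (by simp [List.isPrefixOf]; intro h'; exact absurd h'.symm h)
theorem Rm_pass' (c : Char) (t : List Char) (h : c ≠ 'm') : Rm (c :: t) = c :: Rm t :=
  Rm_pass c t (by simp [List.isPrefixOf]; intro h'; exact absurd h'.symm h)

theorem Ra_match (u : List Char) : Ra ('a' :: 'y' :: 'a' :: u) = ' ' :: Ra u := by
  rw [Ra, replace_pos _ _ _ (by simp) (by simp [List.isPrefixOf])]; rfl
theorem Ry_match (u : List Char) : Ry ('y' :: 'e' :: u) = ' ' :: Ry u := by
  rw [Ry, replace_pos _ _ _ (by simp) (by simp [List.isPrefixOf])]; rfl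
theorem Rw_match (u : List Char) : Rw ('w' :: 'o' :: 'o' :: u) = ' ' :: Rw u := by
  rw [Rw, replace_pos _ _ _ (by simp) (by simp [List.isPrefixOf])]; rfl
theorem Rm_match (u : List Char) : Rm ('m' :: 'a' :: u) = ' ' :: Rm u := by
  rw [Rm, replace_pos _ _ _ (by simp) (by simp [List.isPrefixOf])]; rfl

theorem Ra_inv (s z : List Char) (c : Char) (h : Ra s = c :: z) (hc : c ≠ ' ') :
    ∃ t, s = c :: t ∧ z = Ra t := replace_cons_inv _ (by simp) _ _ _ h hc
theorem Ry_inv (s z : List Char) (c : Char) (h : Ry s = c :: z) (hc : c ≠ ' ') :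
    ∃ t, s = c :: t ∧ z = Ry t := replace_cons_inv _ (by simp) _ _ _ h hc
theorem Rw_inv (s z : List Char) (c : Char) (h : Rw s = c :: z) (hc : c ≠ ' ') :
    ∃ t, s = c :: t ∧ z = Rw t := replace_cons_inv _ (by simp) _ _ _ h hc

theorem main_lemma : ∀ (n : Nat) (cs : List Char), cs.length ≤ n →
    (repl4 cs).all PySem.Chars.isspace = okAux cs := by
  intro n
  induction n using Nat.strong_induction_on with
  | _ n ih =>
  intro cs hlen
  match cs with
  | [] => rw [repl4_eq, Ra_nil, Ry_nil, Rw_nil, Rm_nil, okAux]; rfl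
  | c :: t =>
    have hlt : t.length < n := by simp at hlen; omega
    rw [okAux]
    by_cases hsp : PySem.Chars.isspace c = true
    · -- whitespace head: everything passes through
      have hca : c ≠ 'a' := by rintro rfl; exact absurd hsp (by decide)
      have hcy : c ≠ 'y' := by rintro rfl; exact absurd hsp (by decide)
      have hcw : c ≠ 'w' := by rintro rfl; exact absurd hsp (by decide)
      have hcm : c ≠ 'm' := by rintro rfl; exact absurd hsp (by decide)
      rw [repl4_eq, Ra_pass' c t hca, Ry_pass' c _ hcy, Rw_pass' c _ hcw, Rm_pass' c _ hcm]
      simp only [List.all_cons, hsp, Bool.true_and, if_true]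
      exact ih t.length hlt t (le_refl _)
    · -- non-whitespace head
      rw [if_neg hsp]
      by_cases haya : (['a','y','a'] : List Char).isPrefixOf (c :: t) = true
      · -- consume "aya"
        obtain ⟨u, hu⟩ := List.isPrefixOf_iff_prefix.mp haya
        injection hu with h1 h2
        subst h1; subst h2
        simp only [List.append_eq, List.cons_append, List.nil_append, List.drop_succ_cons, List.drop_zero] at *
        rw [if_pos haya]
        rw [repl4_eq, Ra_match u, Ry_pass' _ _ (by decide), Rw_pass' _ _ (by decide),
          Rm_pass' _ _ (by decide)]
        simp only [List.all_cons, show PySem.Chars.isspace ' ' = true from by decide, Bool.true_and]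
        exact ih _ hlt u (by simp only [List.length_cons]; omega)
      · rw [if_neg haya]
        by_cases hye : (['y','e'] : List Char).isPrefixOf (c :: t) = true
        · -- consume "ye"
          obtain ⟨u, hu⟩ := List.isPrefixOf_iff_prefix.mp hye
          injection hu with h1 h2
          subst h1; subst h2
          simp only [List.append_eq, List.cons_append, List.nil_append, List.drop_succ_cons, List.drop_zero] at *
          rw [if_pos hye]
          rw [repl4_eq, Ra_pass' _ _ (by decide), Ra_pass' _ _ (by decide), Ry_match,
            Rw_pass' _ _ (by decide), Rm_pass' _ _ (by decide)]
          simp only [List.all_cons, show PySem.Chars.isspace ' ' = true from by decide, Bool.true_and]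
          exact ih _ hlt u (by simp only [List.length_cons]; omega)
        · rw [if_neg hye]
          by_cases hwoo : (['w','o','o'] : List Char).isPrefixOf (c :: t) = true
          · -- consume "woo"
            obtain ⟨u, hu⟩ := List.isPrefixOf_iff_prefix.mp hwoo
            injection hu with h1 h2
            subst h1; subst h2
            simp only [List.append_eq, List.cons_append, List.nil_append, List.drop_succ_cons, List.drop_zero] at *
            rw [if_pos hwoo]
            rw [repl4_eq, Ra_pass' _ _ (by decide), Ra_pass' _ _ (by decide),
              Ra_pass' _ _ (by decide), Ry_pass' _ _ (by decide), Ry_pass' _ _ (by decide),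
              Ry_pass' _ _ (by decide), Rw_match, Rm_pass' _ _ (by decide)]
            simp only [List.all_cons, show PySem.Chars.isspace ' ' = true from by decide, Bool.true_and]
            exact ih _ hlt u (by simp only [List.length_cons]; omega)
          · rw [if_neg hwoo]
            by_cases hma : (['m','a'] : List Char).isPrefixOf (c :: t) = true
            · -- head is "ma"
              obtain ⟨u, hu⟩ := List.isPrefixOf_iff_prefix.mp hma
              injection hu with h1 h2
              subst h1; subst h2
              simp only [List.append_eq, List.cons_append, List.nil_append, List.drop_succ_cons, List.drop_zero] at *
              rw [if_pos hma]
              by_cases hyau : (['y','a'] : List Char).isPrefixOf u = true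
              · -- t starts with "aya": A leaves the 'm', B's scan fails after "ma"
                obtain ⟨v, hv⟩ := List.isPrefixOf_iff_prefix.mp hyau
                subst hv
                simp only [List.append_eq, List.cons_append, List.nil_append, List.drop_succ_cons, List.drop_zero] at *
                rw [repl4_eq, Ra_pass' _ _ (by decide), Ra_match, Ry_pass' _ _ (by decide),
                  Ry_pass' _ _ (by decide), Rw_pass' _ _ (by decide), Rw_pass' _ _ (by decide),
                  Rm_pass _ _ (by simp [List.isPrefixOf])]
                rw [okAux]
                simp [List.isPrefixOf, PySem.Chars.isspace]
              · -- ordinary "ma": both consume it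
                have hpre : (['a','y','a'] : List Char).isPrefixOf ('a' :: u) = false := by
                  rw [Bool.eq_false_iff]
                  intro hcontra
                  obtain ⟨r, hr⟩ := List.isPrefixOf_iff_prefix.mp hcontra
                  injection hr with _ h2
                  exact hyau (List.isPrefixOf_iff_prefix.mpr ⟨r, h2⟩)
                rw [repl4_eq, Ra_pass' _ _ (by decide), Ra_pass _ _ hpre,
                  Ry_pass' _ _ (by decide), Ry_pass' _ _ (by decide),
                  Rw_pass' _ _ (by decide), Rw_pass' _ _ (by decide), Rm_match]
                simp only [List.all_cons, show PySem.Chars.isspace ' ' = true from by decide, Bool.true_and]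
                exact ih _ hlt u (by simp only [List.length_cons]; omega)
            · -- no sound and no whitespace: the head character survives all replaces
              rw [if_neg hma]
              have e1 : Ra (c :: t) = c :: Ra t := Ra_pass c t (Bool.eq_false_iff.mpr haya)
              have e2 : Ry (c :: Ra t) = c :: Ry (Ra t) := by
                apply Ry_pass
                by_contra hb
                have hb' := (Bool.not_eq_false _).mp hb
                obtain ⟨r, hr⟩ := List.isPrefixOf_iff_prefix.mp hb'
                have hc : c = 'y' := by injection hr.symm
                have hrt : Ra t = 'e' :: r := by injection hr.symm with _ h
                obtain ⟨t1, ht1, -⟩ := Ra_inv t r 'e' hrt (by decide)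
                apply hye
                rw [hc, ht1]; simp [List.isPrefixOf]
              have e3 : Rw (c :: Ry (Ra t)) = c :: Rw (Ry (Ra t)) := by
                apply Rw_pass
                by_contra hb
                have hb' := (Bool.not_eq_false _).mp hb
                obtain ⟨r, hr⟩ := List.isPrefixOf_iff_prefix.mp hb'
                have hc : c = 'w' := by injection hr.symm
                have hrt : Ry (Ra t) = 'o' :: 'o' :: r := by injection hr.symm with _ h
                obtain ⟨s1, hs1, hz1⟩ := Ry_inv (Ra t) ('o' :: r) 'o' hrt (by decide)
                obtain ⟨s2, hs2, -⟩ := Ry_inv s1 r 'o' hz1.symm (by decide)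
                rw [hs2] at hs1
                obtain ⟨t1, ht1, hz2⟩ := Ra_inv t ('o' :: s2) 'o' hs1 (by decide)
                obtain ⟨t2, ht2, -⟩ := Ra_inv t1 s2 'o' hz2.symm (by decide)
                apply hwoo
                rw [hc, ht1, ht2]; simp [List.isPrefixOf]
              have e4 : Rm (c :: Rw (Ry (Ra t))) = c :: Rm (Rw (Ry (Ra t))) := by
                apply Rm_pass
                by_contra hb
                have hb' := (Bool.not_eq_false _).mp hb
                obtain ⟨r, hr⟩ := List.isPrefixOf_iff_prefix.mp hb'
                have hc : c = 'm' := by injection hr.symm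
                have hrt : Rw (Ry (Ra t)) = 'a' :: r := by injection hr.symm with _ h
                obtain ⟨s1, hs1, -⟩ := Rw_inv (Ry (Ra t)) r 'a' hrt (by decide)
                obtain ⟨s2, hs2, -⟩ := Ry_inv (Ra t) s1 'a' hs1 (by decide)
                obtain ⟨t1, ht1, -⟩ := Ra_inv t s2 'a' hs2 (by decide)
                apply hma
                rw [hc, ht1]; simp [List.isPrefixOf]
              rw [repl4_eq, e1, e2, e3, e4]
              simp only [List.all_cons]
              have hsp' : PySem.Chars.isspace c = false := (Bool.not_eq_true _).mp hsp
              simp [hsp']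

theorem word_eq (w : String) :
    (PySem.Str.strip ((["aya", "ye", "woo", "ma"] : List String).foldl
        (fun x s => PySem.Str.replace x s " ") w) = "")
      ↔ okAux w.toList = true := by
  simp only [List.foldl_cons, List.foldl_nil]
  rw [show ∀ s : String, (s = "") ↔ s.toList = [] from
    fun s => Iff.symm String.toList_eq_nil_iff]
  simp only [PySem.Str.toList_strip, PySem.Str.toList_replace]
  rw [show ("aya" : String).toList = ['a','y','a'] from rfl,
    show ("ye" : String).toList = ['y','e'] from rfl,
    show ("woo" : String).toList = ['w','o','o'] from rfl,
    show ("ma" : String).toList = ['m','a'] from rfl,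
    show (" " : String).toList = [' '] from rfl]
  rw [strip_nil_iff]
  rw [show PySem.Chars.replace
      (PySem.Chars.replace
        (PySem.Chars.replace
          (PySem.Chars.replace w.toList ['a','y','a'] [' '])
          ['y','e'] [' '])
        ['w','o','o'] [' '])
      ['m','a'] [' '] = repl4 w.toList from rfl]
  rw [main_lemma w.toList.length w.toList (le_refl _)]

theorem fun_eq :
    (fun (count : Int) (word : String) =>
      if PySem.Str.strip ((["aya", "ye", "woo", "ma"] : List String).foldl
          (fun x s => PySem.Str.replace x s " ") word) = "" then count + 1 else count)
    = (fun (acc : Int) (w : String) => acc + if okAux w.toList then 1 else 0) := by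
  funext count word
  by_cases h : okAux word.toList = true
  · rw [if_pos (word_eq word |>.mpr h), if_pos h]
  · rw [if_neg (fun hc => h ((word_eq word).mp hc)), if_neg h]
    simp


theorem final (babbling : List String) : solution babbling = solution_alt babbling := by
  simp only [solution, solution_alt]
  rw [fun_eq]

-- ===== VERDICT (by name: the statement is the Claim_ definition above) =====
theorem solution_spec : Claim_equal_solution := by
  intro babbling _
  unfold Spec_solution
  exact final babbling
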